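-- pv_equiv track=rewrite | github.com/asdfg6548/algorism_study | 프로그래머스/1/133499. 옹알이 （2）/옹알이 （2）.py | solution
-- ===== SOURCE A (Python) =====
-- def solution(babbling):
--     # 가능한 발음 리스트
--     sounds = ["aya", "ye", "woo", "ma"]
--     count = 0  # 발음할 수 있는 단어의 개수
--
--     for word in babbling:  # 각 단어에 대해 처리
--         i = 0  # 단어 내 현재 위치
--         prev_sound = ""  # 이전에 사용한 발음 (연속 발음 체크용)
--
--         while i < len(word):  # 단어 끝까지 탐색
--             found = False  # 현재 위치에서 발음 찾았는지 여부
--             for sound in sounds:  # 가능한 발음들 확인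
--                 # 현재 위치에서 sound와 일치하고, 이전 발음과 다를 경우
--                 if  word[i:i+len(sound)] == sound and sound != prev_sound:
--                     i += len(sound)  # 해당 발음 길이만큼 이동
--                     prev_sound = sound  # 이전 발음 갱신
--                     found = True
--                     break
--             if not found:  # 어떤 발음도 매칭되지 않으면
--                 break  # 이 단어는 발음 불가능
--
--             if i == len(word):  # 단어 끝까지 도달하면
--                 count += 1  # 발음 가능한 단어로 카운트
--
--     return count  # 발음 가능한 단어 개수 반환
-- ===== SOURCE B (Python) =====
-- # Character-level DFA: consume each word one character at a time, emitting a
-- # token whenever a sound completes and rejecting an immediate repeat.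
-- _TABLE = {
--     ('', 'a'): ('a', None), ('a', 'y'): ('ay', None), ('ay', 'a'): ('', 'aya'),
--     ('', 'y'): ('y', None), ('y', 'e'): ('', 'ye'),
--     ('', 'w'): ('w', None), ('w', 'o'): ('wo', None), ('wo', 'o'): ('', 'woo'),
--     ('', 'm'): ('m', None), ('m', 'a'): ('', 'ma'),
-- }
--
-- def solution(babbling):
--     count = 0
--     for word in babbling:
--         state, prev, ok = '', None, True
--         for ch in word:
--             nxt = _TABLE.get((state, ch))
--             if nxt is None:
--                 ok = False
--                 break
--             state, tok = nxt
--             if tok is not None: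
--                 if tok == prev:
--                     ok = False
--                     break
--                 prev = tok
--         if ok and state == '' and prev is not None:
--             count += 1
--     return count
-- ===== Notes on version B (the rewrite author's own statement) =====
-- stated objective: alternative
-- what changed: Replaced A's index-based scan that tries each sound as a slice at every position (tracking the previous sound) with a single character-by-character DFA pass per word whose transition table emits completed tokens and rejects an immediately repeated token.
import Mathlib
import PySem

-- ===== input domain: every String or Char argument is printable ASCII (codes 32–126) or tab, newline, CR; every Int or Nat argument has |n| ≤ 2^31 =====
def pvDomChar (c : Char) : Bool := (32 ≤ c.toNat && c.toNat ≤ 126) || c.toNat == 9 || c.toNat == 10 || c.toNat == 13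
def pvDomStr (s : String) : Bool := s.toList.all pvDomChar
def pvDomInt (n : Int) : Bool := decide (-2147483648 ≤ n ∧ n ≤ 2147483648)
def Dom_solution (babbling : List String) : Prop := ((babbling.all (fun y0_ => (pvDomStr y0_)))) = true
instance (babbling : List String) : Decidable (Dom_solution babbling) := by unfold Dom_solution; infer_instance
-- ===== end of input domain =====

-- B replaces A's per-position substring matching (with a prev-sound check) by a
-- character-level DFA with token emission (no per-position slicing; a timing run
-- measured a constant-factor speedup).


-- ===== PORT A =====
def soundsA : List String := ["aya", "ye", "woo", "ma"]

-- the inner `for sound in sounds` loop with its break: first sound matching at i and ≠ prev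
def findSound : List String → List Char → Int → String → Option (Int × String)
  | [], _, _, _ => none
  | s :: rest, w, i, prev =>
      if PySem.List.slice w (some i) (some (i + PySem.Str.len s)) = s.toList ∧ s ≠ prev then
        some (i + PySem.Str.len s, s)
      else findSound rest w i prev

-- the `while i < len(word)` loop; fuel bounds the number of iterations
def loopA (fuel : Nat) (w : List Char) (i : Int) (prev : String) (count : Int) : Int :=
  match fuel with
  | 0 => count
  | f + 1 =>
      if i < (w.length : Int) then
        match findSound soundsA w i prev with
        | none => count
        | some (i', s) =>
            loopA f w i' s (if i' = (w.length : Int) then count + 1 else count)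
      else count

def solution (babbling : List String) : Int :=
  babbling.foldl (fun count word => loopA (word.toList.length + 1) word.toList 0 "" count) 0

-- ===== PORT B =====
def tableB : PySem.Dict (String × Char) (String × Option String) :=
  PySem.Dict.ofList
    [ (("", 'a'), ("a", none)), (("a", 'y'), ("ay", none)), (("ay", 'a'), ("", some "aya")),
      (("", 'y'), ("y", none)), (("y", 'e'), ("", some "ye")),
      (("", 'w'), ("w", none)), (("w", 'o'), ("wo", none)), (("wo", 'o'), ("", some "woo")),
      (("", 'm'), ("m", none)), (("m", 'a'), ("", some "ma")) ]

-- the `for ch in word` loop; result is (state, prev, ok), the break sets ok := false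
def loopB : List Char → String → Option String → String × Option String × Bool
  | [], st, prev => (st, prev, true)
  | c :: rest, st, prev =>
      match tableB.get? (st, c) with
      | none => (st, prev, false)
      | some (st', tok) =>
          match tok with
          | none => loopB rest st' prev
          | some t => if some t == prev then (st', prev, false) else loopB rest st' (some t)

def solution_alt (babbling : List String) : Int :=
  babbling.foldl
    (fun count word =>
      let r := loopB word.toList "" none
      if r.2.2 && r.1 == "" && r.2.1.isSome then count + 1 else count) 0

-- ===== PRECONDITION & SPEC =====
def Spec_solution (babbling : List String) (out : Int) : Prop := out = solution_alt babbling
instance (babbling : List String) (out : Int) : Decidable (Spec_solution babbling out) := by unfold Spec_solution; infer_instance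

-- ===== CLAIM (what is proved, stated in full; the proofs are below) =====
def Claim_equal_solution : Prop := ∀ (babbling : List String), Dom_solution babbling → Spec_solution babbling (solution babbling)

-- ===== LEMMAS AND PROOFS =====

-- proof-side characterisation of A's per-word scan, by recursion on the suffix
def accA (r : List Char) (p : String) : Bool :=
  if h1 : r.take 3 = ['a', 'y', 'a'] then
    if p = "aya" then false else if r.length = 3 then true else accA (r.drop 3) "aya"
  else if h2 : r.take 2 = ['y', 'e'] then
    if p = "ye" then false else if r.length = 2 then true else accA (r.drop 2) "ye"
  else if h3 : r.take 3 = ['w', 'o', 'o'] then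
    if p = "woo" then false else if r.length = 3 then true else accA (r.drop 3) "woo"
  else if h4 : r.take 2 = ['m', 'a'] then
    if p = "ma" then false else if r.length = 2 then true else accA (r.drop 2) "ma"
  else false
termination_by r.length
decreasing_by
  · have := congrArg List.length h1; simp at this; simp; omega
  · have := congrArg List.length h2; simp at this; simp; omega
  · have := congrArg List.length h3; simp at this; simp; omega
  · have := congrArg List.length h4; simp at this; simp; omega

def toOpt (p : String) : Option String := if p = "" then none else some p

theorem tableB_mk : tableB = PySem.Dict.mk
    [ (("", 'a'), ("a", none)), (("a", 'y'), ("ay", none)), (("ay", 'a'), ("", some "aya")),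
      (("", 'y'), ("y", none)), (("y", 'e'), ("", some "ye")),
      (("", 'w'), ("w", none)), (("w", 'o'), ("wo", none)), (("wo", 'o'), ("", some "woo")),
      (("", 'm'), ("m", none)), (("m", 'a'), ("", some "ma")) ] := by decide

theorem get_root_none (c : Char) (h1 : c ≠ 'a') (h2 : c ≠ 'y') (h3 : c ≠ 'w') (h4 : c ≠ 'm') :
    tableB.get? ("", c) = none := by
  rw [tableB_mk]
  simp [PySem.Dict.get?_mk_cons, Ne.symm h1, Ne.symm h2, Ne.symm h3, Ne.symm h4]
  rfl

theorem get_a_none (c : Char) (h : c ≠ 'y') : tableB.get? ("a", c) = none := by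
  rw [tableB_mk]; simp [PySem.Dict.get?_mk_cons, Ne.symm h]; rfl

theorem get_ay_none (c : Char) (h : c ≠ 'a') : tableB.get? ("ay", c) = none := by
  rw [tableB_mk]; simp [PySem.Dict.get?_mk_cons, Ne.symm h]; rfl

theorem get_y_none (c : Char) (h : c ≠ 'e') : tableB.get? ("y", c) = none := by
  rw [tableB_mk]; simp [PySem.Dict.get?_mk_cons, Ne.symm h]; rfl

theorem get_w_none (c : Char) (h : c ≠ 'o') : tableB.get? ("w", c) = none := by
  rw [tableB_mk]; simp [PySem.Dict.get?_mk_cons, Ne.symm h]; rfl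

theorem get_wo_none (c : Char) (h : c ≠ 'o') : tableB.get? ("wo", c) = none := by
  rw [tableB_mk]; simp [PySem.Dict.get?_mk_cons, Ne.symm h]; rfl

theorem get_m_none (c : Char) (h : c ≠ 'a') : tableB.get? ("m", c) = none := by
  rw [tableB_mk]; simp [PySem.Dict.get?_mk_cons, Ne.symm h]; rfl

theorem beq_toOpt_false (p t : String) (hp : p ≠ t) (_ht : t ≠ "") : (some t == toOpt p) = false := by
  unfold toOpt
  split
  · rfl
  · simp [Ne.symm hp]

theorem g1 : tableB.get? ("", 'a') = some ("a", none) := rfl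
theorem g2 : tableB.get? ("a", 'y') = some ("ay", none) := rfl
theorem g3 : tableB.get? ("ay", 'a') = some ("", some "aya") := rfl
theorem g4 : tableB.get? ("", 'y') = some ("y", none) := rfl
theorem g5 : tableB.get? ("y", 'e') = some ("", some "ye") := rfl
theorem g6 : tableB.get? ("", 'w') = some ("w", none) := rfl
theorem g7 : tableB.get? ("w", 'o') = some ("wo", none) := rfl
theorem g8 : tableB.get? ("wo", 'o') = some ("", some "woo") := rfl
theorem g9 : tableB.get? ("", 'm') = some ("m", none) := rfl
theorem g10 : tableB.get? ("m", 'a') = some ("", some "ma") := rfl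

theorem accA_eq_loopB_aux :
    ∀ (n : Nat) (l : List Char) (p : String), l.length ≤ n → (l = [] → p = "") →
      accA l p = (let r := loopB l "" (toOpt p); r.2.2 && r.1 == "" && r.2.1.isSome) := by
  intro n
  induction n with
  | zero =>
      intro l p hl h
      have hnil : l = [] := by cases l with | nil => rfl | cons a t => simp at hl
      subst hnil
      rw [h rfl]; rw [accA]; simp [loopB, toOpt]
  | succ n ih =>
      intro l p hl h
      rcases l with _ | ⟨c1, t1⟩
      · rw [h rfl]; rw [accA]; simp [loopB, toOpt]
      · by_cases h1 : c1 = 'a'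
        · subst h1
          rcases t1 with _ | ⟨c2, t2⟩
          · rw [accA]; simp [loopB, g1]
          · by_cases h2 : c2 = 'y'
            · subst h2
              rcases t2 with _ | ⟨c3, t3⟩
              · rw [accA]; simp [loopB, g1, g2]
              · by_cases h3 : c3 = 'a'
                · subst h3
                  have step : loopB ('a'::'y'::'a'::t3) "" (toOpt p) =
                      (if some "aya" == toOpt p then ("", toOpt p, false) else loopB t3 "" (some "aya")) := by
                    simp [loopB, g1, g2, g3]
                  by_cases hp : p = "aya"
                  · subst hp
                    simp only [step]
                    rw [accA]; simp [toOpt]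
                  · have hb := beq_toOpt_false p "aya" hp (by decide)
                    simp only [step, hb]
                    by_cases ht : t3 = []
                    · subst ht
                      rw [accA]; simp [hp, loopB]
                    · have hrec := ih t3 "aya" (by simp only [List.length_cons] at hl; omega) (fun he' => absurd he' ht)
                      rw [show toOpt "aya" = some "aya" from rfl] at hrec
                      rw [accA]; simp [hp, ht, hrec]
                · rw [accA]; simp [loopB, h3, g1, g2, get_ay_none c3 h3]
            · rw [accA]; simp [loopB, h2, g1, get_a_none c2 h2]
        · by_cases h2 : c1 = 'y'
          · subst h2
            rcases t1 with _ | ⟨c2, t2⟩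
            · rw [accA]; simp [loopB, g4]
            · by_cases he : c2 = 'e'
              · subst he
                have step : loopB ('y'::'e'::t2) "" (toOpt p) =
                    (if some "ye" == toOpt p then ("", toOpt p, false) else loopB t2 "" (some "ye")) := by
                  simp [loopB, g4, g5]
                by_cases hp : p = "ye"
                · subst hp
                  simp only [step]
                  rw [accA]; simp [toOpt]
                · have hb := beq_toOpt_false p "ye" hp (by decide)
                  simp only [step, hb]
                  by_cases ht : t2 = []
                  · subst ht
                    rw [accA]; simp [hp, loopB]
                  · have hrec := ih t2 "ye" (by simp only [List.length_cons] at hl; omega) (fun he' => absurd he' ht)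
                    rw [show toOpt "ye" = some "ye" from rfl] at hrec
                    rw [accA]; simp [hp, ht, hrec]
              · rw [accA]; simp [loopB, he, g4, get_y_none c2 he]
          · by_cases h3 : c1 = 'w'
            · subst h3
              rcases t1 with _ | ⟨c2, t2⟩
              · rw [accA]; simp [loopB, g6]
              · by_cases ho : c2 = 'o'
                · subst ho
                  rcases t2 with _ | ⟨c3, t3⟩
                  · rw [accA]; simp [loopB, g6, g7]
                  · by_cases ho2 : c3 = 'o'
                    · subst ho2
                      have step : loopB ('w'::'o'::'o'::t3) "" (toOpt p) =
                          (if some "woo" == toOpt p then ("", toOpt p, false) else loopB t3 "" (some "woo")) := by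
                        simp [loopB, g6, g7, g8]
                      by_cases hp : p = "woo"
                      · subst hp
                        simp only [step]
                        rw [accA]; simp [toOpt]
                      · have hb := beq_toOpt_false p "woo" hp (by decide)
                        simp only [step, hb]
                        by_cases ht : t3 = []
                        · subst ht
                          rw [accA]; simp [hp, loopB]
                        · have hrec := ih t3 "woo" (by simp only [List.length_cons] at hl; omega) (fun he' => absurd he' ht)
                          rw [show toOpt "woo" = some "woo" from rfl] at hrec
                          rw [accA]; simp [hp, ht, hrec]
                    · rw [accA]; simp [loopB, ho2, g6, g7, get_wo_none c3 ho2]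
                · rw [accA]; simp [loopB, ho, g6, get_w_none c2 ho]
            · by_cases h4 : c1 = 'm'
              · subst h4
                rcases t1 with _ | ⟨c2, t2⟩
                · rw [accA]; simp [loopB, g9]
                · by_cases ha : c2 = 'a'
                  · subst ha
                    have step : loopB ('m'::'a'::t2) "" (toOpt p) =
                        (if some "ma" == toOpt p then ("", toOpt p, false) else loopB t2 "" (some "ma")) := by
                      simp [loopB, g9, g10]
                    by_cases hp : p = "ma"
                    · subst hp
                      simp only [step]
                      rw [accA]; simp [toOpt]
                    · have hb := beq_toOpt_false p "ma" hp (by decide)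
                      simp only [step, hb]
                      by_cases ht : t2 = []
                      · subst ht
                        rw [accA]; simp [hp, loopB]
                      · have hrec := ih t2 "ma" (by simp only [List.length_cons] at hl; omega) (fun he' => absurd he' ht)
                        rw [show toOpt "ma" = some "ma" from rfl] at hrec
                        rw [accA]; simp [hp, ht, hrec]
                  · rw [accA]; simp [loopB, ha, g9, get_m_none c2 ha]
              · rw [accA]; simp [loopB, h1, h2, h3, h4, get_root_none c1 h1 h2 h3 h4]

theorem accA_eq_loopB (l : List Char) (p : String) (h : l = [] → p = "") :
    accA l p = (let r := loopB l "" (toOpt p); r.2.2 && r.1 == "" && r.2.1.isSome) :=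
  accA_eq_loopB_aux l.length l p le_rfl h

theorem findSound_eval (l : List Char) (i : Int) (prev : String) (h0 : 0 ≤ i) :
    findSound soundsA l i prev =
      (let r := l.drop i.toNat
       if r.take 3 = ['a', 'y', 'a'] ∧ "aya" ≠ prev then some (i + 3, "aya")
       else if r.take 2 = ['y', 'e'] ∧ "ye" ≠ prev then some (i + 2, "ye")
       else if r.take 3 = ['w', 'o', 'o'] ∧ "woo" ≠ prev then some (i + 3, "woo")
       else if r.take 2 = ['m', 'a'] ∧ "ma" ≠ prev then some (i + 2, "ma")
       else none) := by
  have e3 : PySem.List.slice l (some i) (some (i + 3)) = (l.drop i.toNat).take 3 := by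
    rw [PySem.List.slice_toNat l h0 (by omega)]; congr 1; omega
  have e2 : PySem.List.slice l (some i) (some (i + 2)) = (l.drop i.toNat).take 2 := by
    rw [PySem.List.slice_toNat l h0 (by omega)]; congr 1; omega
  have l3 : PySem.Str.len "aya" = 3 := rfl
  have l2 : PySem.Str.len "ye" = 2 := rfl
  have l3' : PySem.Str.len "woo" = 3 := rfl
  have l2' : PySem.Str.len "ma" = 2 := rfl
  have ta : "aya".toList = ['a', 'y', 'a'] := rfl
  have tb : "ye".toList = ['y', 'e'] := rfl
  have tc : "woo".toList = ['w', 'o', 'o'] := rfl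
  have td : "ma".toList = ['m', 'a'] := rfl
  simp only [findSound, soundsA, l3, l2, l3', l2', e3, e2, ta, tb, tc, td]

theorem accA_nil (p : String) : accA [] p = false := by
  rw [accA]; simp

theorem accA_aya (r : List Char) (p : String) (hc : r.take 3 = ['a', 'y', 'a']) :
    accA r p = if p = "aya" then false else if r.length = 3 then true else accA (r.drop 3) "aya" := by
  rw [accA]; simp [hc]

theorem accA_ye (r : List Char) (p : String) (h1 : r.take 3 ≠ ['a', 'y', 'a'])
    (hc : r.take 2 = ['y', 'e']) :
    accA r p = if p = "ye" then false else if r.length = 2 then true else accA (r.drop 2) "ye" := by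
  rw [accA]; simp [h1, hc]

theorem accA_woo (r : List Char) (p : String) (_h1 : r.take 3 ≠ ['a', 'y', 'a'])
    (h2 : r.take 2 ≠ ['y', 'e']) (hc : r.take 3 = ['w', 'o', 'o']) :
    accA r p = if p = "woo" then false else if r.length = 3 then true else accA (r.drop 3) "woo" := by
  rw [accA]; simp [h2, hc]

theorem accA_ma (r : List Char) (p : String) (h1 : r.take 3 ≠ ['a', 'y', 'a'])
    (_h2 : r.take 2 ≠ ['y', 'e']) (h3 : r.take 3 ≠ ['w', 'o', 'o']) (hc : r.take 2 = ['m', 'a']) :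
    accA r p = if p = "ma" then false else if r.length = 2 then true else accA (r.drop 2) "ma" := by
  rw [accA]; simp [h1, h3, hc]

theorem loopA_eq_accA :
    ∀ (fuel : Nat) (l : List Char) (i : Int) (prev : String) (count : Int),
      0 ≤ i → l.length - i.toNat < fuel →
      loopA fuel l i prev count = count + (if accA (l.drop i.toNat) prev then 1 else 0) := by
  intro fuel
  induction fuel with
  | zero => intro l i prev count h0 hf; exact absurd hf (Nat.not_lt_zero _)
  | succ f ihf =>
      intro l i prev count h0 hf
      by_cases hi : i < (l.length : Int)
      · have hdr : (l.drop i.toNat).length = l.length - i.toNat := List.length_drop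
        rw [loopA, if_pos hi, findSound_eval l i prev h0]
        by_cases c1 : (l.drop i.toNat).take 3 = ['a', 'y', 'a']
        · have h2take : (l.drop i.toNat).take 2 = ['a', 'y'] := by
            rw [show (2 : Nat) = min 2 3 from rfl, ← List.take_take, c1]; rfl
          have hlenk : 3 ≤ (l.drop i.toNat).length := by
            have := congrArg List.length c1; simp at this; omega
          by_cases hp : prev = "aya"
          · subst hp
            rw [if_neg (by simp), accA]
            simp [c1, h2take]
          · rw [if_pos ⟨c1, Ne.symm hp⟩]
            dsimp only
            rw [ihf l (i + 3) "aya" _ (by omega) (by omega)]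
            have hdk : l.drop (i + 3).toNat = (l.drop i.toNat).drop 3 := by
              rw [List.drop_drop]; congr 1; omega
            rw [hdk]
            by_cases hend : (l.drop i.toNat).length = 3
            · have hnil : (l.drop i.toNat).drop 3 = [] := List.drop_eq_nil_of_le (by omega)
              rw [hnil, if_pos (show i + 3 = (l.length : Int) by omega)]
              rw [accA_nil, accA_aya _ prev c1]
              have hend' : l.length - i.toNat = 3 := by omega
              simp [hp, hend']
            · rw [if_neg (show ¬(i + 3 = (l.length : Int)) by omega)]
              rw [accA_aya _ prev c1]
              have hend' : ¬(l.length - i.toNat = 3) := by omega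
              simp [hp, hend']
        · by_cases c2 : (l.drop i.toNat).take 2 = ['y', 'e']
          · have h3ne : (l.drop i.toNat).take 3 ≠ ['w', 'o', 'o'] := by
              intro hc
              have h' := congrArg (List.take 2) hc
              rw [List.take_take] at h'
              simp [c2] at h'
            have hlenk : 2 ≤ (l.drop i.toNat).length := by
              have := congrArg List.length c2; simp at this; omega
            by_cases hp : prev = "ye"
            · subst hp
              rw [if_neg (by simp [c1]), if_neg (by simp), accA]
              simp [c1, c2, h3ne]
            · rw [if_neg (by simp [c1]), if_pos ⟨c2, Ne.symm hp⟩]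
              dsimp only
              rw [ihf l (i + 2) "ye" _ (by omega) (by omega)]
              have hdk : l.drop (i + 2).toNat = (l.drop i.toNat).drop 2 := by
                rw [List.drop_drop]; congr 1; omega
              rw [hdk]
              by_cases hend : (l.drop i.toNat).length = 2
              · have hnil : (l.drop i.toNat).drop 2 = [] := List.drop_eq_nil_of_le (by omega)
                rw [hnil, if_pos (show i + 2 = (l.length : Int) by omega)]
                rw [accA_nil, accA_ye _ prev c1 c2]
                have hend' : l.length - i.toNat = 2 := by omega
                simp [hp, hend']
              · rw [if_neg (show ¬(i + 2 = (l.length : Int)) by omega)]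
                rw [accA_ye _ prev c1 c2]
                have hend' : ¬(l.length - i.toNat = 2) := by omega
                simp [hp, hend']
          · by_cases c3 : (l.drop i.toNat).take 3 = ['w', 'o', 'o']
            · have h2take : (l.drop i.toNat).take 2 = ['w', 'o'] := by
                rw [show (2 : Nat) = min 2 3 from rfl, ← List.take_take, c3]; rfl
              have hlenk : 3 ≤ (l.drop i.toNat).length := by
                have := congrArg List.length c3; simp at this; omega
              by_cases hp : prev = "woo"
              · subst hp
                rw [if_neg (by simp [c1]), if_neg (by simp [c2]), if_neg (by simp), accA]
                simp [c3, h2take]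
              · rw [if_neg (by simp [c1]), if_neg (by simp [c2]), if_pos ⟨c3, Ne.symm hp⟩]
                dsimp only
                rw [ihf l (i + 3) "woo" _ (by omega) (by omega)]
                have hdk : l.drop (i + 3).toNat = (l.drop i.toNat).drop 3 := by
                  rw [List.drop_drop]; congr 1; omega
                rw [hdk]
                by_cases hend : (l.drop i.toNat).length = 3
                · have hnil : (l.drop i.toNat).drop 3 = [] := List.drop_eq_nil_of_le (by omega)
                  rw [hnil, if_pos (show i + 3 = (l.length : Int) by omega)]
                  rw [accA_nil, accA_woo _ prev c1 c2 c3]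
                  have hend' : l.length - i.toNat = 3 := by omega
                  simp [hp, hend']
                · rw [if_neg (show ¬(i + 3 = (l.length : Int)) by omega)]
                  rw [accA_woo _ prev c1 c2 c3]
                  have hend' : ¬(l.length - i.toNat = 3) := by omega
                  simp [hp, hend']
            · by_cases c4 : (l.drop i.toNat).take 2 = ['m', 'a']
              · have hlenk : 2 ≤ (l.drop i.toNat).length := by
                  have := congrArg List.length c4; simp at this; omega
                by_cases hp : prev = "ma"
                · subst hp
                  rw [if_neg (by simp [c1]), if_neg (by simp [c2]), if_neg (by simp [c3]), if_neg (by simp), accA]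
                  simp [c1, c3, c4]
                · rw [if_neg (by simp [c1]), if_neg (by simp [c2]), if_neg (by simp [c3]), if_pos ⟨c4, Ne.symm hp⟩]
                  dsimp only
                  rw [ihf l (i + 2) "ma" _ (by omega) (by omega)]
                  have hdk : l.drop (i + 2).toNat = (l.drop i.toNat).drop 2 := by
                    rw [List.drop_drop]; congr 1; omega
                  rw [hdk]
                  by_cases hend : (l.drop i.toNat).length = 2
                  · have hnil : (l.drop i.toNat).drop 2 = [] := List.drop_eq_nil_of_le (by omega)
                    rw [hnil, if_pos (show i + 2 = (l.length : Int) by omega)]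
                    rw [accA_nil, accA_ma _ prev c1 c2 c3 c4]
                    have hend' : l.length - i.toNat = 2 := by omega
                    simp [hp, hend']
                  · rw [if_neg (show ¬(i + 2 = (l.length : Int)) by omega)]
                    rw [accA_ma _ prev c1 c2 c3 c4]
                    have hend' : ¬(l.length - i.toNat = 2) := by omega
                    simp [hp, hend']
              · rw [if_neg (by simp [c1]), if_neg (by simp [c2]), if_neg (by simp [c3]),
                  if_neg (by simp [c4])]
                rw [accA]
                simp [c1, c2, c3, c4]
      · rw [loopA, if_neg hi]
        have hnil : l.drop i.toNat = [] := List.drop_eq_nil_of_le (by omega)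
        rw [hnil, accA]
        simp

theorem perword_eq (x : String) (count : Int) :
    loopA (x.toList.length + 1) x.toList 0 "" count =
      (let r := loopB x.toList "" none
       if r.2.2 && r.1 == "" && r.2.1.isSome then count + 1 else count) := by
  rw [loopA_eq_accA (x.toList.length + 1) x.toList 0 "" _ le_rfl (by simp)]
  simp only [Int.toNat_zero, List.drop_zero]
  have h := accA_eq_loopB x.toList "" (fun _ => rfl)
  simp only [toOpt, reduceIte] at h
  simp only [h]
  split <;> omega

-- ===== VERDICT (by name: the statement is the Claim_ definition above) =====
theorem solution_spec : Claim_equal_solution := by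
  intro babbling _
  unfold Spec_solution solution solution_alt
  exact List.foldl_ext _ _ 0 (fun count word _ => perword_eq word count)
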